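-- pv_equiv track=rewrite | github.com/RAHUL-AGRAWAL04/AI-mini-Projects | 3 water jug problem/3_water_jug_using_bfs.py | pour_water_from_jug2_to_jug3
-- ===== SOURCE A (Python) =====
-- jug3 = 3
--
-- def pour_water_from_jug2_to_jug3(capacity):
--     current_jug1 = capacity[0]
--     current_jug2 = capacity[1]
--     current_jug3 = capacity[2]
--     available_capacity = jug3-current_jug3
--     while True:
--       if (current_jug2<=0 or current_jug3>=jug3) or available_capacity<=0:
--           break
--       else:
--         available_capacity -= 1
--         current_jug2 -= 1
--         current_jug3 += 1
--     return [current_jug1,current_jug2, current_jug3]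
-- ===== SOURCE B (Python) =====
-- jug3 = 3
--
-- def pour_water_from_jug2_to_jug3(capacity):
--     amount = max(0, min(capacity[1], jug3 - capacity[2]))
--     return [capacity[0], capacity[1] - amount, capacity[2] + amount]
-- ===== Notes on version B (the rewrite author's own statement) =====
-- stated objective: simpler
-- what changed: Replaces the unit-step while-loop with a closed-form transfer amount max(0, min(jug2, 3 - jug3)).
import Mathlib
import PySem

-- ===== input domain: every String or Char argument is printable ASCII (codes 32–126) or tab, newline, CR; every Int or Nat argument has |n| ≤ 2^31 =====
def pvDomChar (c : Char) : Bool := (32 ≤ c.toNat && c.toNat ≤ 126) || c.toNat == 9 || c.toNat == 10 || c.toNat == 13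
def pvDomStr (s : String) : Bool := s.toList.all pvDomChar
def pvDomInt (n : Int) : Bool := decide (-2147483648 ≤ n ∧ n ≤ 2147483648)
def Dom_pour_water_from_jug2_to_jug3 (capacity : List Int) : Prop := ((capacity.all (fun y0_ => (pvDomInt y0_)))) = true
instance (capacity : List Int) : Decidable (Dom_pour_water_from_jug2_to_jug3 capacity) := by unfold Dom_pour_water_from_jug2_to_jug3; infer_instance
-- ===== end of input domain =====

-- B replaces A's unit-step while-loop by the closed-form transfer amount
-- max(0, min(jug2, 3 - jug3)); objective: simpler. Equal return values on all
-- lists of length ≥ 3 (Pre_); shorter lists make both Pythons raise IndexError.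

-- ===== PORT A =====
-- the while-loop of A, state (current_jug2, current_jug3, available_capacity)
def pourLoopA (j2 j3 avail : Int) : Int × Int :=
  if j2 ≤ 0 ∨ j3 ≥ 3 ∨ avail ≤ 0 then (j2, j3)
  else pourLoopA (j2 - 1) (j3 + 1) (avail - 1)
termination_by avail.toNat
decreasing_by omega

def pour_water_from_jug2_to_jug3 (capacity : List Int) : List Int :=
  let c1 := (PySem.List.pyGet? capacity 0).getD 0   -- none only outside Pre_
  let c2 := (PySem.List.pyGet? capacity 1).getD 0
  let c3 := (PySem.List.pyGet? capacity 2).getD 0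
  let r := pourLoopA c2 c3 (3 - c3)
  [c1, r.1, r.2]

-- ===== PORT B =====
def pour_water_from_jug2_to_jug3_alt (capacity : List Int) : List Int :=
  let c1 := (PySem.List.pyGet? capacity 0).getD 0   -- none only outside Pre_
  let c2 := (PySem.List.pyGet? capacity 1).getD 0
  let c3 := (PySem.List.pyGet? capacity 2).getD 0
  let amount := max 0 (min c2 (3 - c3))
  [c1, c2 - amount, c3 + amount]

-- ===== PRECONDITION & SPEC =====
-- Pre_ : capacity has at least the three entries A indexes; on shorter lists
-- both Pythons raise IndexError.
def Pre_pour_water_from_jug2_to_jug3 (capacity : List Int) : Prop := 3 ≤ capacity.length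
instance (capacity : List Int) : Decidable (Pre_pour_water_from_jug2_to_jug3 capacity) := by
  unfold Pre_pour_water_from_jug2_to_jug3; infer_instance

def pvWitness_pour_water_from_jug2_to_jug3 : List Int := [4, 2, 1]

def Spec_pour_water_from_jug2_to_jug3 (capacity : List Int) (out : List Int) : Prop :=
  out = pour_water_from_jug2_to_jug3_alt capacity
instance (capacity : List Int) (out : List Int) : Decidable (Spec_pour_water_from_jug2_to_jug3 capacity out) := by
  unfold Spec_pour_water_from_jug2_to_jug3; infer_instance

-- ===== CLAIM (what is proved, stated in full; the proofs are below) =====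
def Claim_equal_pour_water_from_jug2_to_jug3 : Prop :=
  ∀ (capacity : List Int), Dom_pour_water_from_jug2_to_jug3 capacity →
    Pre_pour_water_from_jug2_to_jug3 capacity →
    Spec_pour_water_from_jug2_to_jug3 capacity (pour_water_from_jug2_to_jug3 capacity)

-- ===== LEMMAS AND PROOFS =====
theorem pourLoopA_eq (j2 j3 avail : Int) (hav : avail = 3 - j3) :
    pourLoopA j2 j3 avail = (j2 - max 0 (min j2 avail), j3 + max 0 (min j2 avail)) := by
  fun_induction pourLoopA j2 j3 avail with
  | case1 j2 j3 avail h =>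
    have h0 : max 0 (min j2 avail) = 0 := by omega
    simp [h0]
  | case2 j2 j3 avail h ih =>
    rw [ih (by omega), Prod.mk.injEq]
    constructor <;> omega

theorem pour_water_from_jug2_to_jug3_spec : Claim_equal_pour_water_from_jug2_to_jug3 := by
  intro capacity _ _
  unfold Spec_pour_water_from_jug2_to_jug3 pour_water_from_jug2_to_jug3
    pour_water_from_jug2_to_jug3_alt
  simp [pourLoopA_eq _ _ _ rfl]
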